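-- pv_equiv track=rewrite | github.com/KimJonghoSNU/Abstraction_gap | scripts/analysis/analyze_round6_gold_region_exit.py | _count_pool_gold_hits
-- ===== SOURCE A (Python) =====
-- from typing import Any, Dict, List, Sequence, Tuple
--
-- def _is_prefix(prefix: Sequence[int], full: Sequence[int]) -> bool:
--     prefix_t = tuple(prefix)
--     full_t = tuple(full)
--     return len(prefix_t) <= len(full_t) and full_t[: len(prefix_t)] == prefix_t
--
-- def _count_pool_gold_hits(
--     selected_branches: Sequence[Tuple[int, ...]],
--     cumulative_reached_leaves: Sequence[Tuple[int, ...]],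
--     gold_paths: Sequence[Tuple[int, ...]],
-- ) -> int:
--     cumulative_set = {tuple(path) for path in list(cumulative_reached_leaves or [])}
--     selected_list = [tuple(path) for path in list(selected_branches or [])]
--     if (not cumulative_set) and (not selected_list):
--         return int(len(gold_paths))
--
--     hits = 0
--     for gold_path in gold_paths:
--         gp_t = tuple(gold_path)
--         if gp_t in cumulative_set:
--             hits += 1
--             continue
--         if any(_is_prefix(branch_path, gp_t) for branch_path in selected_list):
--             hits += 1
--     return hits
-- ===== SOURCE B (Python) =====
-- def _count_pool_gold_hits(selected_branches, cumulative_reached_leaves, gold_paths):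
--     # Hash-index approach: membership-test each gold path's prefixes against a set
--     # of branches, instead of scanning every branch per gold path.
--     cum = {tuple(p) for p in (cumulative_reached_leaves or [])}
--     branches = {tuple(p) for p in (selected_branches or [])}
--     if not cum and not branches:
--         return len(gold_paths)
--     hits = 0
--     for gold in gold_paths:
--         g = tuple(gold)
--         if g in cum or any(g[:i] in branches for i in range(len(g) + 1)):
--             hits += 1
--     return hits
-- ===== Notes on version B (the rewrite author's own statement) =====
-- stated objective: alternative
-- what changed: B deduplicates selected_branches into a set and, per gold path, membership-tests the path's own prefixes against that set, replacing A's helper-based scan of every branch per gold path.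
import Mathlib
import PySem

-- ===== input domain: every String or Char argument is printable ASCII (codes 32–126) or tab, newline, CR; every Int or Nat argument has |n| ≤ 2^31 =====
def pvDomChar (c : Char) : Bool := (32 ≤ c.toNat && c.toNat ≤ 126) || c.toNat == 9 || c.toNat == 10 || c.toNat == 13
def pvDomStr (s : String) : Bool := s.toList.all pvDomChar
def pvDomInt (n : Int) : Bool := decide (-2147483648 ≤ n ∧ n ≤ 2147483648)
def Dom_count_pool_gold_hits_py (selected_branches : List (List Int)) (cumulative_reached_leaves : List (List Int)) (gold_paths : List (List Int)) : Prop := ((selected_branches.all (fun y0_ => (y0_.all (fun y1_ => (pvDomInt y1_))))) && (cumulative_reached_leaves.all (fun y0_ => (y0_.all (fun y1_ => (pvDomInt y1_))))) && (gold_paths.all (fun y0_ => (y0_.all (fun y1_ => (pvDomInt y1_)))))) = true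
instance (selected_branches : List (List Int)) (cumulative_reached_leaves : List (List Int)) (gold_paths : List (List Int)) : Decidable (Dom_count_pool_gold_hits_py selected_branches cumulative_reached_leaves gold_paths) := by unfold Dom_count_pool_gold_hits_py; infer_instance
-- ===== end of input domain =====

-- B deduplicates the branches into a set and membership-tests each gold path's
-- prefixes against it instead of scanning every branch per gold path (objective: alternative).

-- ===== PORT A =====
-- _is_prefix(prefix, full)
def pyIsPrefix (pfx full : List Int) : Bool :=
  decide (pfx.length ≤ full.length) && (PySem.List.slice full none (some (pfx.length : Int)) == pfx)

def count_pool_gold_hits_py (selected_branches : List (List Int)) (cumulative_reached_leaves : List (List Int)) (gold_paths : List (List Int)) : Int :=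
  let cumulative_set : PySem.Set (List Int) := PySem.Set.ofList cumulative_reached_leaves
  let selected_list : List (List Int) := selected_branches
  if cumulative_set.isEmpty && selected_list.isEmpty then (gold_paths.length : Int)
  else
    gold_paths.foldl (fun hits gp_t =>
      if PySem.Set.contains cumulative_set gp_t then hits + 1
      else if selected_list.any (fun branch_path => pyIsPrefix branch_path gp_t) then hits + 1
      else hits) 0

-- ===== PORT B =====
def count_pool_gold_hits_py_alt (selected_branches : List (List Int)) (cumulative_reached_leaves : List (List Int)) (gold_paths : List (List Int)) : Int :=
  let cum : PySem.Set (List Int) := PySem.Set.ofList cumulative_reached_leaves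
  let branches : PySem.Set (List Int) := PySem.Set.ofList selected_branches
  if cum.isEmpty && branches.isEmpty then (gold_paths.length : Int)
  else
    gold_paths.foldl (fun hits g =>
      if PySem.Set.contains cum g
         || (PySem.List.pyRange 0 ((g.length : Int) + 1) 1).any
              (fun i => PySem.Set.contains branches (PySem.List.slice g none (some i)))
      then hits + 1 else hits) 0

-- ===== PRECONDITION & SPEC =====
def Spec_count_pool_gold_hits_py (selected_branches : List (List Int)) (cumulative_reached_leaves : List (List Int)) (gold_paths : List (List Int)) (out : Int) : Prop := out = count_pool_gold_hits_py_alt selected_branches cumulative_reached_leaves gold_paths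
instance (selected_branches : List (List Int)) (cumulative_reached_leaves : List (List Int)) (gold_paths : List (List Int)) (out : Int) : Decidable (Spec_count_pool_gold_hits_py selected_branches cumulative_reached_leaves gold_paths out) := by unfold Spec_count_pool_gold_hits_py; infer_instance

-- ===== CLAIM (what is proved, stated in full; the proofs are below) =====
def Claim_equal_count_pool_gold_hits_py : Prop := ∀ (selected_branches : List (List Int)) (cumulative_reached_leaves : List (List Int)) (gold_paths : List (List Int)), Dom_count_pool_gold_hits_py selected_branches cumulative_reached_leaves gold_paths → Spec_count_pool_gold_hits_py selected_branches cumulative_reached_leaves gold_paths (count_pool_gold_hits_py selected_branches cumulative_reached_leaves gold_paths)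

-- ===== LEMMAS AND PROOFS =====

-- "some branch is a prefix of g" = "some prefix of g is in the branch set"
lemma any_prefix_eq (sb : List (List Int)) (g : List Int) :
    (sb.any (fun b => pyIsPrefix b g))
      = (PySem.List.pyRange 0 ((g.length : Int) + 1) 1).any
          (fun i => PySem.Set.contains (PySem.Set.ofList sb) (PySem.List.slice g none (some i))) := by
  rcases h : sb.any (fun b => pyIsPrefix b g) with _ | _
  · symm
    rw [List.any_eq_false] at h ⊢
    intro i hi
    rw [PySem.List.mem_pyRange_one] at hi
    intro hc
    rw [PySem.Set.contains_iff, PySem.Set.mem_ofList] at hc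
    refine h _ hc ?_
    have h0 : (0:Int) ≤ i := hi.1
    rw [PySem.List.slice_to g h0] at hc ⊢
    simp only [pyIsPrefix, PySem.List.slice_to_natCast]
    simp [List.length_take]
  · symm
    rw [List.any_eq_true] at h ⊢
    obtain ⟨b, hb, hpfx⟩ := h
    simp only [pyIsPrefix, Bool.and_eq_true, decide_eq_true_eq, beq_iff_eq,
      PySem.List.slice_to_natCast] at hpfx
    refine ⟨(b.length : Int), ?_, ?_⟩
    · rw [PySem.List.mem_pyRange_one]
      constructor <;> [positivity; exact_mod_cast Nat.lt_succ_of_le hpfx.1]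
    · rw [PySem.List.slice_to g (by positivity)]
      simp only [Int.toNat_natCast, hpfx.2]
      rw [PySem.Set.contains_iff, PySem.Set.mem_ofList]
      exact hb

lemma fold_eq (sb cum : List (List Int)) (gp : List Int) (hits : Int) :
    (if PySem.Set.contains (PySem.Set.ofList cum) gp then hits + 1
     else if sb.any (fun b => pyIsPrefix b gp) then hits + 1 else hits)
      = (if PySem.Set.contains (PySem.Set.ofList cum) gp
            || (PySem.List.pyRange 0 ((gp.length : Int) + 1) 1).any
                 (fun i => PySem.Set.contains (PySem.Set.ofList sb) (PySem.List.slice gp none (some i)))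
         then hits + 1 else hits) := by
  rw [← any_prefix_eq]
  by_cases h1 : PySem.Set.contains (PySem.Set.ofList cum) gp = true <;>
    by_cases h2 : sb.any (fun b => pyIsPrefix b gp) = true <;>
      simp [h2]

-- ===== VERDICT (by name: the statement is the Claim_ definition above) =====
theorem count_pool_gold_hits_py_spec : Claim_equal_count_pool_gold_hits_py := by
  intro sb cum gp _
  simp only [Spec_count_pool_gold_hits_py, count_pool_gold_hits_py, count_pool_gold_hits_py_alt]
  have hempty : sb.isEmpty = (PySem.Set.ofList sb).isEmpty := by
    cases sb <;> simp [PySem.Set.ofList_nil, PySem.Set.ofList_cons]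
  rw [← hempty]
  split
  · rfl
  · exact PySem.List.foldl_congr_mem _ _ _ _ (fun hits g _ => fold_eq sb cum g hits)
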